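-- pv_equiv track=rewrite | github.com/erikhenriksson/fin-clariah-social-media | lemmatize.py | has_multiple_clusters
-- ===== SOURCE A (Python) =====
-- def has_multiple_clusters(data) -> bool:
--     """Check if data has more than one unique cluster_id."""
--     if isinstance(data, dict):
--         return False
--     elif isinstance(data, list):
--         cluster_ids = set()
--         for item in data:
--             if isinstance(item, dict):
--                 cluster_id = item.get("cluster_id", "")
--                 if cluster_id:
--                     cluster_ids.add(cluster_id)
--         return len(cluster_ids) > 1
--     return False
-- ===== SOURCE B (Python) =====
-- def has_multiple_clusters(data) -> bool:
--     """Check if data has more than one unique cluster_id."""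
--     if isinstance(data, dict):
--         return False
--     if not isinstance(data, list):
--         return False
--     first = None
--     for item in data:
--         if not isinstance(item, dict):
--             continue
--         cluster_id = item.get("cluster_id", "")
--         if not cluster_id:
--             continue
--         if first is None:
--             first = cluster_id
--         elif cluster_id != first:
--             return True
--     return False
-- ===== Notes on version B (the rewrite author's own statement) =====
-- stated objective: simpler
-- what changed: Instead of collecting all distinct truthy cluster_ids into a set and testing its size at the end, B remembers only the first truthy cluster_id seen and returns True as soon as a different one appears (early exit, O(1) extra space).
import Mathlib
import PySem

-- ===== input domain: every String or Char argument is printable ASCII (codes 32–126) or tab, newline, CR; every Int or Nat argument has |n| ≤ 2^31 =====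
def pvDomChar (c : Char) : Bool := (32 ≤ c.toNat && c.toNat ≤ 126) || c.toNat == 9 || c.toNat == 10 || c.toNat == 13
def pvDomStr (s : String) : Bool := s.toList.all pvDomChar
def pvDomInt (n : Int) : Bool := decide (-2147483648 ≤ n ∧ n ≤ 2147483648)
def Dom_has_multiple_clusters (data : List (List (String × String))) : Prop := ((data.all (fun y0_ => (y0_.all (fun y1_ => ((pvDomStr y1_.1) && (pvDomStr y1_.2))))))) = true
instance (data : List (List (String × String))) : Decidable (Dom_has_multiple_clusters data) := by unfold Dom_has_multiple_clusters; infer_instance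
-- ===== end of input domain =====

-- ===== PORT A =====
-- B keeps only the first truthy cluster_id and exits early on a different one, instead of
-- A's building a set of all distinct truthy ids and measuring its size (objective: simpler).
-- In the Lean type, data is always a list of dicts, so A's isinstance branches are statically resolved.
def has_multiple_clusters (data : List (List (String × String))) : Bool :=
  let cluster_ids := data.foldl (fun s item =>
    let cluster_id := PySem.Dict.getD (PySem.Dict.mk item) "cluster_id" ""
    if cluster_id ≠ "" then PySem.Set.add s cluster_id else s) PySem.Set.empty
  decide (1 < PySem.Set.len cluster_ids)

-- ===== PORT B =====
-- the loop of Source B: `first` is the Option String state; `return True` is the literal true branch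
def hmcLoop : List (List (String × String)) → Option String → Bool
  | [], _ => false
  | item :: rest, first =>
    let cluster_id := PySem.Dict.getD (PySem.Dict.mk item) "cluster_id" ""
    if cluster_id = "" then hmcLoop rest first
    else
      match first with
      | none => hmcLoop rest (some cluster_id)
      | some f => if cluster_id ≠ f then true else hmcLoop rest (some f)

def has_multiple_clusters_alt (data : List (List (String × String))) : Bool :=
  hmcLoop data none

-- ===== PRECONDITION & SPEC =====
def Spec_has_multiple_clusters (data : List (List (String × String))) (out : Bool) : Prop := out = has_multiple_clusters_alt data
instance (data : List (List (String × String))) (out : Bool) : Decidable (Spec_has_multiple_clusters data out) := by unfold Spec_has_multiple_clusters; infer_instance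

-- ===== CLAIM (what is proved, stated in full; the proofs are below) =====
def Claim_equal_has_multiple_clusters : Prop := ∀ (data : List (List (String × String))), Dom_has_multiple_clusters data → Spec_has_multiple_clusters data (has_multiple_clusters data)

-- ===== LEMMAS AND PROOFS =====

def hmcStep (s : PySem.Set String) (item : List (String × String)) : PySem.Set String :=
  let cluster_id := PySem.Dict.getD (PySem.Dict.mk item) "cluster_id" ""
  if cluster_id ≠ "" then PySem.Set.add s cluster_id else s

theorem hmc_len_mono (rest : List (List (String × String))) (s : PySem.Set String) :
    s.length ≤ (rest.foldl hmcStep s).length := by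
  induction rest generalizing s with
  | nil => simp
  | cons item rest ih =>
    refine le_trans ?_ (ih (hmcStep s item))
    simp only [hmcStep, PySem.Set.add]
    split_ifs <;> simp

theorem hmc_single (rest : List (List (String × String))) (f : String) :
    decide (1 < (rest.foldl hmcStep [f]).length) = hmcLoop rest (some f) := by
  induction rest with
  | nil => simp [hmcLoop]
  | cons item rest ih =>
    simp only [List.foldl_cons, hmcStep, hmcLoop]
    by_cases hc : PySem.Dict.getD (PySem.Dict.mk item) "cluster_id" "" = ""
    · simp [hc, ih]
    · by_cases hf : PySem.Dict.getD (PySem.Dict.mk item) "cluster_id" "" = f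
      · simp only [hc, hf, PySem.Set.add, PySem.Set.contains, ite_not, if_false]
        simpa [hf] using ih
      · simp only [hc, hf, ite_not, if_false]
        have hadd : PySem.Set.add [f] (PySem.Dict.getD (PySem.Dict.mk item) "cluster_id" "") =
            [f, PySem.Dict.getD (PySem.Dict.mk item) "cluster_id" ""] := by
          simp [PySem.Set.add, PySem.Set.contains, hf]
        rw [hadd]
        have h2 := hmc_len_mono rest [f, PySem.Dict.getD (PySem.Dict.mk item) "cluster_id" ""]
        simp only [decide_eq_true_iff]
        simp only [List.length_cons, List.length_nil] at h2
        omega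

theorem hmc_empty (rest : List (List (String × String))) :
    decide (1 < (rest.foldl hmcStep []).length) = hmcLoop rest none := by
  induction rest with
  | nil => simp [hmcLoop]
  | cons item rest ih =>
    simp only [List.foldl_cons, hmcStep, hmcLoop]
    by_cases hc : PySem.Dict.getD (PySem.Dict.mk item) "cluster_id" "" = ""
    · simp [hc, ih]
    · simp [hc, PySem.Set.add, PySem.Set.contains, hmc_single]

-- ===== VERDICT (by name: the statement is the Claim_ definition above) =====
theorem has_multiple_clusters_spec : Claim_equal_has_multiple_clusters := by
  intro data _
  unfold Spec_has_multiple_clusters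
  show decide ((1 : Int) < PySem.Set.len (data.foldl hmcStep [])) = has_multiple_clusters_alt data
  rw [show has_multiple_clusters_alt data = hmcLoop data none from rfl, ← hmc_empty data]
  simp only [PySem.Set.len, decide_eq_decide]
  omega
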